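-- pv_equiv track=rewrite | github.com/shankar-1403/pcred_financial_analyzer | backend/banks/indian.py | _detect_columns_fmt_a
-- ===== SOURCE A (Python) =====
-- HEADER_MAP_A = {
--     "date": [
--         "value date",
--         "valuedate",
--         "date",
--     ],
--     "description": [
--         "description",
--         "narration",
--         "particulars",
--     ],
--     "cheque": [
--         "cheque no",
--         "chequeno",
--         "cheque",
--     ],
--     "debit": [
--         "dr",
--         "debit",
--         "withdrawal",
--     ],
--     "credit": [
--         "cr",
--         "credit",
--         "deposit",
--     ],
--     "balance": [
--         "balance",
--         "running balance",
--     ],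
-- }
--
-- def _detect_columns_fmt_a(row_clean):
--     mapping = {}
--     for field, variants in HEADER_MAP_A.items():
--         for idx, cell in enumerate(row_clean):
--             if cell in variants:
--                 mapping[field] = idx
--                 break
--         if field in mapping:
--             continue
--         for idx, cell in enumerate(row_clean):
--             if any(len(v) >= 4 and v in cell for v in variants):
--                 mapping[field] = idx
--                 break
--     return mapping if len(mapping) >= 3 else None
-- ===== SOURCE B (Python) =====
-- HEADER_MAP_A = {
--     "date": ["value date", "valuedate", "date"],
--     "description": ["description", "narration", "particulars"],
--     "cheque": ["cheque no", "chequeno", "cheque"],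
--     "debit": ["dr", "debit", "withdrawal"],
--     "credit": ["cr", "credit", "deposit"],
--     "balance": ["balance", "running balance"],
-- }
--
-- # Inverted table: each variant string names its field (variant lists are disjoint).
-- _EXACT = {v: f for f, vs in HEADER_MAP_A.items() for v in vs}
-- # Per field, the variants long enough (len >= 4) for substring matching.
-- _LONG = {f: [v for v in vs if len(v) >= 4] for f, vs in HEADER_MAP_A.items()}
--
--
-- def _detect_columns_fmt_a(row_clean):
--     # Phase 1: one left-to-right pass recording the first exact match per field.
--     exact = {}
--     for idx, cell in enumerate(row_clean):
--         f = _EXACT.get(cell)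
--         if f is not None and f not in exact:
--             exact[f] = idx
--     # Phase 2: one left-to-right pass recording the first substring match
--     # for fields without an exact match.
--     sub = {}
--     for idx, cell in enumerate(row_clean):
--         for f, longs in _LONG.items():
--             if f in exact or f in sub:
--                 continue
--             if any(v in cell for v in longs):
--                 sub[f] = idx
--     mapping = {}
--     for f in HEADER_MAP_A:
--         if f in exact:
--             mapping[f] = exact[f]
--         elif f in sub:
--             mapping[f] = sub[f]
--     return mapping if len(mapping) >= 3 else None
-- ===== Notes on version B (the rewrite author's own statement) =====
-- stated objective: alternative
-- what changed: A scans the whole row once or twice per field (fields-outer nested loops); B inverts the iteration: it precomputes a variant->field table and a len>=4 variant list per field, makes one left-to-right pass over the row recording each field's first exact-match index, one pass handling all still-missing fields' substring fallbacks, and assembles the mapping at the end.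
import Mathlib
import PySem

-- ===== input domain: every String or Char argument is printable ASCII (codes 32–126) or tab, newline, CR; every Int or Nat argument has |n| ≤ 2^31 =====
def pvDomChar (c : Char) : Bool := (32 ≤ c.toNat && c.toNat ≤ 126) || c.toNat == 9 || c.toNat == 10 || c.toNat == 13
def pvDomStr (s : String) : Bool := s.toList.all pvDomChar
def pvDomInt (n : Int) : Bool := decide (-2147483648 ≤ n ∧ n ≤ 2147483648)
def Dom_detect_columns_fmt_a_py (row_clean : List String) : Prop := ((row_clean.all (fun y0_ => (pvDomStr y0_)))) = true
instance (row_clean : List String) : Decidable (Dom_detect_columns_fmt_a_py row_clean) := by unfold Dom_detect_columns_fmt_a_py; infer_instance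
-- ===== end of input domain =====

-- B replaces A's per-field scans (nested loops fields×cells, twice) by two single
-- left-to-right passes over the row — an inverted variant→field table for exact
-- matches, then one pass handling all still-missing fields' substring fallbacks —
-- and assembles the mapping at the end; same return value (objective: alternative).

-- ===== PORT A =====
def headerMapA : List (String × List String) :=
  [("date", ["value date", "valuedate", "date"]),
   ("description", ["description", "narration", "particulars"]),
   ("cheque", ["cheque no", "chequeno", "cheque"]),
   ("debit", ["dr", "debit", "withdrawal"]),
   ("credit", ["cr", "credit", "deposit"]),
   ("balance", ["balance", "running balance"])]

-- 'for idx, cell in enumerate(row_clean): if cell in variants: … break' (first exact match)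
def scanExactA (variants : List String) (i : Nat) : List String → Option Int
  | [] => none
  | c :: rest => if variants.contains c then some (i : Int) else scanExactA variants (i + 1) rest

-- second loop: first cell containing a variant of len >= 4
def scanSubA (variants : List String) (i : Nat) : List String → Option Int
  | [] => none
  | c :: rest =>
    if variants.any (fun v => decide (4 ≤ PySem.Str.len v) && PySem.Str.isIn v c) then some (i : Int)
    else scanSubA variants (i + 1) rest

def detect_columns_fmt_a_py (row_clean : List String) : Option (List (String × Int)) :=
  let mapping := headerMapA.foldl (fun (m : PySem.Dict String Int) fv =>
    let m1 := match scanExactA fv.2 0 row_clean with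
              | some i => m.insert fv.1 i
              | none => m
    if (m1.get? fv.1).isSome then m1
    else match scanSubA fv.2 0 row_clean with
         | some i => m1.insert fv.1 i
         | none => m1) PySem.Dict.empty
  if 3 ≤ mapping.size then some mapping.items else none

-- ===== PORT B =====
-- _EXACT: inverted table, variant → field
def exactTableB : PySem.Dict String String :=
  PySem.Dict.ofList
    [("value date", "date"), ("valuedate", "date"), ("date", "date"),
     ("description", "description"), ("narration", "description"), ("particulars", "description"),
     ("cheque no", "cheque"), ("chequeno", "cheque"), ("cheque", "cheque"),
     ("dr", "debit"), ("debit", "debit"), ("withdrawal", "debit"),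
     ("cr", "credit"), ("credit", "credit"), ("deposit", "credit"),
     ("balance", "balance"), ("running balance", "balance")]

-- _LONG: per field, the variants of len >= 4
def longTableB : List (String × List String) :=
  [("date", ["value date", "valuedate", "date"]),
   ("description", ["description", "narration", "particulars"]),
   ("cheque", ["cheque no", "chequeno", "cheque"]),
   ("debit", ["debit", "withdrawal"]),
   ("credit", ["credit", "deposit"]),
   ("balance", ["balance", "running balance"])]

-- phase 1: one pass, first exact match per field
def exactPassB (e : PySem.Dict String Int) (i : Nat) : List String → PySem.Dict String Int
  | [] => e
  | c :: rest =>
    let e' := match exactTableB.get? c with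
              | some f => if (e.get? f).isSome then e else e.insert f (i : Int)
              | none => e
    exactPassB e' (i + 1) rest

-- phase 2, body of the inner 'for f, longs in _LONG.items()' loop, for one cell
def subStepB (exact : PySem.Dict String Int) (i : Nat) (c : String)
    (s : PySem.Dict String Int) : PySem.Dict String Int :=
  longTableB.foldl (fun s fl =>
    if (exact.get? fl.1).isSome || (s.get? fl.1).isSome then s
    else if fl.2.any (fun v => PySem.Str.isIn v c) then s.insert fl.1 (i : Int) else s) s

def subPassB (exact : PySem.Dict String Int) (s : PySem.Dict String Int) (i : Nat) :
    List String → PySem.Dict String Int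
  | [] => s
  | c :: rest => subPassB exact (subStepB exact i c s) (i + 1) rest

def detect_columns_fmt_a_py_alt (row_clean : List String) : Option (List (String × Int)) :=
  let exact := exactPassB PySem.Dict.empty 0 row_clean
  let sub := subPassB exact PySem.Dict.empty 0 row_clean
  let mapping := headerMapA.foldl (fun (m : PySem.Dict String Int) fv =>
    match exact.get? fv.1 with
    | some i => m.insert fv.1 i
    | none => match sub.get? fv.1 with
              | some i => m.insert fv.1 i
              | none => m) PySem.Dict.empty
  if 3 ≤ mapping.size then some mapping.items else none

-- ===== PRECONDITION & SPEC =====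
def Spec_detect_columns_fmt_a_py (row_clean : List String) (out : Option (List (String × Int))) : Prop := out = detect_columns_fmt_a_py_alt row_clean
instance (row_clean : List String) (out : Option (List (String × Int))) : Decidable (Spec_detect_columns_fmt_a_py row_clean out) := by unfold Spec_detect_columns_fmt_a_py; infer_instance

-- ===== CLAIM (what is proved, stated in full; the proofs are below) =====
def Claim_equal_detect_columns_fmt_a_py : Prop := ∀ (row_clean : List String), Dom_detect_columns_fmt_a_py row_clean → Spec_detect_columns_fmt_a_py row_clean (detect_columns_fmt_a_py row_clean)

-- ===== LEMMAS AND PROOFS =====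

-- first index ≥ i of a cell satisfying p (proof-side abstraction of both sides' scans)
def pscan (p : String → Bool) (i : Nat) : List String → Option Int
  | [] => none
  | c :: rest => if p c then some (i : Int) else pscan p (i + 1) rest

theorem pscan_congr (p q : String → Bool) (h : ∀ c, p c = q c) (i : Nat) (xs : List String) :
    pscan p i xs = pscan q i xs := by
  have : p = q := funext h
  rw [this]

theorem scanExactA_eq_pscan (vs : List String) (i : Nat) (xs : List String) :
    scanExactA vs i xs = pscan (fun c => vs.contains c) i xs := by
  induction xs generalizing i with
  | nil => rfl
  | cons c rest ih => simp [scanExactA, pscan, ih]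

theorem scanSubA_eq_pscan (vs : List String) (i : Nat) (xs : List String) :
    scanSubA vs i xs
      = pscan (fun c => vs.any (fun v => decide (4 ≤ PySem.Str.len v) && PySem.Str.isIn v c)) i xs := by
  induction xs generalizing i with
  | nil => rfl
  | cons c rest ih => simp [scanSubA, pscan, ih]

theorem exactPassB_get? (f : String) (xs : List String) :
    ∀ (e : PySem.Dict String Int) (i : Nat),
    (exactPassB e i xs).get? f
      = (e.get? f).or (pscan (fun c => exactTableB.get? c == some f) i xs) := by
  induction xs with
  | nil => intro e i; simp [exactPassB, pscan]
  | cons c rest ih =>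
    intro e i
    rcases hg : exactTableB.get? c with _ | g
    · simp [exactPassB, hg, ih, pscan]
    · by_cases hfg : f = g
      · subst hfg
        rcases he : e.get? f with _ | v
        · simp [exactPassB, hg, ih, pscan, he, PySem.Dict.get?_insert_self]
        · simp [exactPassB, hg, ih, pscan, he]
      · have hbe : (some g == some f) = false := by
          simp; exact fun h => hfg h.symm
        rcases he : e.get? g with _ | v <;>
          simp [exactPassB, hg, ih, pscan, he, hbe,
                PySem.Dict.get?_insert_of_ne _ _ hfg]

-- the inner field loop leaves keys it does not own alone
theorem subFold_preserve (exact : PySem.Dict String Int) (i : Nat) (c : String) (f : String)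
    (F : List (String × List String)) (hF : f ∉ F.map Prod.fst) :
    ∀ s : PySem.Dict String Int,
      (F.foldl (fun s fl =>
        if (exact.get? fl.1).isSome || (s.get? fl.1).isSome then s
        else if fl.2.any (fun v => PySem.Str.isIn v c) then s.insert fl.1 (i : Int) else s) s).get? f
      = s.get? f := by
  induction F with
  | nil => intro s; rfl
  | cons fl F ih =>
    intro s
    simp only [List.map_cons, List.mem_cons, not_or] at hF
    rw [List.foldl_cons, ih (by simpa using hF.2)]
    split_ifs with h1 h2
    · rfl
    · exact PySem.Dict.get?_insert_of_ne _ _ hF.1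
    · rfl

theorem subStepB_get? (exact : PySem.Dict String Int) (f : String)
    (longs : List String) (F1 F2 : List (String × List String))
    (hdec : longTableB = F1 ++ (f, longs) :: F2)
    (h1 : f ∉ F1.map Prod.fst) (h2 : f ∉ F2.map Prod.fst)
    (s : PySem.Dict String Int) (i : Nat) (c : String) :
    (subStepB exact i c s).get? f
      = if (exact.get? f).isSome || (s.get? f).isSome then s.get? f
        else if longs.any (fun v => PySem.Str.isIn v c) then some (i : Int) else s.get? f := by
  unfold subStepB
  rw [hdec, List.foldl_append, List.foldl_cons]
  rw [subFold_preserve exact i c f F2 h2]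
  rw [subFold_preserve exact i c f F1 h1]
  split_ifs with hc hm
  · exact subFold_preserve exact i c f F1 h1 s
  · exact PySem.Dict.get?_insert_self _ _ _
  · exact subFold_preserve exact i c f F1 h1 s

theorem subPassB_get? (exact : PySem.Dict String Int) (f : String) (q : String → Bool)
    (Hf : ∀ (s : PySem.Dict String Int) (i : Nat) (c : String),
      (subStepB exact i c s).get? f
        = if (exact.get? f).isSome || (s.get? f).isSome then s.get? f
          else if q c then some (i : Int) else s.get? f)
    (xs : List String) : ∀ (s : PySem.Dict String Int) (i : Nat),
    (subPassB exact s i xs).get? f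
      = (s.get? f).or (if (exact.get? f).isSome then none else pscan q i xs) := by
  induction xs with
  | nil => intro s i; cases h : s.get? f <;> simp [subPassB, pscan, h]
  | cons c rest ih =>
    intro s i
    simp only [subPassB]
    rw [ih, Hf]
    by_cases hE : (exact.get? f).isSome
    · simp [hE]
    · have hEb : (exact.get? f).isSome = false := by simpa using hE
      rcases hs : s.get? f with _ | v
      · by_cases hq : q c <;> simp [pscan, hEb, hq]
      · simp [hEb]

-- the final-assembly fold over fresh distinct keys appends one item per some-valued field
theorem foldl_opt_insert_items (o : String × List String → Option Int) :
    ∀ (L : List (String × List String)) (m : PySem.Dict String Int),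
      (L.map Prod.fst).Nodup → (∀ fv ∈ L, m.contains fv.1 = false) →
      (L.foldl (fun (m : PySem.Dict String Int) fv =>
          match o fv with
          | some i => m.insert fv.1 i
          | none => m) m).items
        = m.items ++ L.filterMap (fun fv => (o fv).map (fun i => (fv.1, i))) := by
  intro L
  induction L with
  | nil => intro m _ _; simp
  | cons fv L ih =>
    intro m hnd hm
    simp only [List.map_cons, List.nodup_cons] at hnd
    have hmf : m.contains fv.1 = false := hm fv (List.mem_cons_self ..)
    rcases ho : o fv with _ | i
    · simp only [List.foldl_cons, ho]
      rw [ih m hnd.2 (fun gv hg => hm gv (List.mem_cons_of_mem _ hg))]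
      simp [ho]
    · simp only [List.foldl_cons, ho]
      rw [ih (m.insert fv.1 i) hnd.2 ?_]
      · rw [PySem.Dict.items_insert_of_not_contains _ _ hmf]
        simp [ho]
      · intro gv hg
        rw [PySem.Dict.contains_insert]
        have hne : gv.1 ≠ fv.1 := by
          intro h; exact hnd.1 (h ▸ List.mem_map_of_mem hg)
        simp [hne, hm gv (List.mem_cons_of_mem _ hg)]

-- A's per-field loop body is the same fold shape with o = scanExact <|> scanSub
theorem portA_foldl_eq (row : List String) :
    ∀ (L : List (String × List String)) (m : PySem.Dict String Int),
      (L.map Prod.fst).Nodup → (∀ fv ∈ L, m.contains fv.1 = false) →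
      L.foldl (fun (m : PySem.Dict String Int) fv =>
        let m1 := match scanExactA fv.2 0 row with
                  | some i => m.insert fv.1 i
                  | none => m
        if (m1.get? fv.1).isSome then m1
        else match scanSubA fv.2 0 row with
             | some i => m1.insert fv.1 i
             | none => m1) m
      = L.foldl (fun (m : PySem.Dict String Int) fv =>
          match (scanExactA fv.2 0 row).or (scanSubA fv.2 0 row) with
          | some i => m.insert fv.1 i
          | none => m) m := by
  intro L
  induction L with
  | nil => intro m _ _; rfl
  | cons fv L ih =>
    intro m hnd hm
    simp only [List.map_cons, List.nodup_cons] at hnd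
    have hmf : m.contains fv.1 = false := hm fv (List.mem_cons_self ..)
    have hget : m.get? fv.1 = none := (PySem.Dict.get?_eq_none_iff_contains _ _).mpr hmf
    have step_eq :
        (let m1 := match scanExactA fv.2 0 row with
                   | some i => m.insert fv.1 i
                   | none => m
         if (m1.get? fv.1).isSome then m1
         else match scanSubA fv.2 0 row with
              | some i => m1.insert fv.1 i
              | none => m1)
        = (match (scanExactA fv.2 0 row).or (scanSubA fv.2 0 row) with
           | some i => m.insert fv.1 i
           | none => m) := by
      rcases hE : scanExactA fv.2 0 row with _ | i
      · rcases hS : scanSubA fv.2 0 row with _ | j <;> simp [hget]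
      · simp [PySem.Dict.get?_insert_self]
    simp only [List.foldl_cons, step_eq]
    have hfresh : ∀ gv ∈ L,
        (match (scanExactA fv.2 0 row).or (scanSubA fv.2 0 row) with
         | some i => m.insert fv.1 i
         | none => m).contains gv.1 = false := by
      intro gv hg
      have hne : gv.1 ≠ fv.1 := by
        intro h; exact hnd.1 (h ▸ List.mem_map_of_mem hg)
      rcases (scanExactA fv.2 0 row).or (scanSubA fv.2 0 row) with _ | i
      · exact hm gv (List.mem_cons_of_mem _ hg)
      · rw [PySem.Dict.contains_insert]
        simp [hne, hm gv (List.mem_cons_of_mem _ hg)]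
    exact ih _ hnd.2 hfresh

-- exact lookup through the inverted table, characterised once: for a table with
-- distinct keys, 'get? c names field f' iff c is a key whose value is f
def exactPairs : List (String × String) :=
  [("value date", "date"), ("valuedate", "date"), ("date", "date"),
   ("description", "description"), ("narration", "description"), ("particulars", "description"),
   ("cheque no", "cheque"), ("chequeno", "cheque"), ("cheque", "cheque"),
   ("dr", "debit"), ("debit", "debit"), ("withdrawal", "debit"),
   ("cr", "credit"), ("credit", "credit"), ("deposit", "credit"),
   ("balance", "balance"), ("running balance", "balance")]

theorem tbl : exactTableB = PySem.Dict.mk exactPairs := by decide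

theorem contains_filterMap_false (f c : String) (L : List (String × String))
    (hc : c ∉ L.map Prod.fst) :
    (L.filterMap (fun p => if p.2 == f then some p.1 else none)).contains c = false := by
  simp
  exact fun h => hc (List.mem_map_of_mem h)

theorem get?_table (f : String) : ∀ (L : List (String × String)),
    (L.map Prod.fst).Nodup → ∀ (c : String),
    ((PySem.Dict.mk L).get? c == some f)
      = (L.filterMap (fun p => if p.2 == f then some p.1 else none)).contains c := by
  intro L
  induction L with
  | nil => intro _ c; rfl
  | cons p L ih =>
    intro hnd c
    obtain ⟨k, v⟩ := p
    simp only [List.map_cons, List.nodup_cons] at hnd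
    rw [PySem.Dict.get?_mk_cons]
    by_cases hkc : k = c
    · subst hkc
      rw [if_pos (by simp)]
      by_cases hvf : v = f
      · simp [hvf]
      · simp only [List.filterMap_cons]
        rw [if_neg (by simp [hvf])]
        rw [contains_filterMap_false f k L hnd.1]
        simp [hvf]
    · rw [if_neg (by simp [hkc])]
      rw [ih hnd.2 c]
      by_cases hvf : v = f
      · simp [hvf]
        exact fun h => absurd h.symm hkc
      · simp [hvf]

theorem pE_of (f : String) (vs : List String)
    (h : exactPairs.filterMap (fun p => if p.2 == f then some p.1 else none) = vs)
    (c : String) : (exactTableB.get? c == some f) = vs.contains c := by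
  rw [tbl, get?_table f exactPairs (by decide) c, h]

-- pointwise predicate identity (substring phase): the precomputed long lists
-- are exactly the 'len(v) >= 4' filtered variants
theorem pQ_all (vs longs : List String)
    (h : longs = vs.filter (fun v => decide (4 ≤ PySem.Str.len v))) (c : String) :
    (longs.any (fun v => PySem.Str.isIn v c))
      = vs.any (fun v => decide (4 ≤ PySem.Str.len v) && PySem.Str.isIn v c) := by
  subst h
  rw [List.any_filter]

-- per-field value of B's two passes = A's two scans, combined
theorem field_opt (row : List String) (f : String) (vs longs : List String)
    (F1 F2 : List (String × List String))
    (hdec : longTableB = F1 ++ (f, longs) :: F2)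
    (h1 : f ∉ F1.map Prod.fst) (h2 : f ∉ F2.map Prod.fst)
    (hpE : ∀ c, (exactTableB.get? c == some f) = vs.contains c)
    (hlongs : longs = vs.filter (fun v => decide (4 ≤ PySem.Str.len v))) :
    ((exactPassB PySem.Dict.empty 0 row).get? f).or
        ((subPassB (exactPassB PySem.Dict.empty 0 row) PySem.Dict.empty 0 row).get? f)
      = (scanExactA vs 0 row).or (scanSubA vs 0 row) := by
  have hE : (exactPassB PySem.Dict.empty 0 row).get? f = scanExactA vs 0 row := by
    rw [exactPassB_get?, PySem.Dict.get?_empty, scanExactA_eq_pscan]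
    simp only [Option.none_or]
    exact pscan_congr _ _ hpE 0 row
  have hS : (subPassB (exactPassB PySem.Dict.empty 0 row) PySem.Dict.empty 0 row).get? f
      = if ((exactPassB PySem.Dict.empty 0 row).get? f).isSome then none
        else scanSubA vs 0 row := by
    rw [subPassB_get? _ f (fun c => longs.any (fun v => PySem.Str.isIn v c))
          (subStepB_get? _ f longs F1 F2 hdec h1 h2),
        PySem.Dict.get?_empty, scanSubA_eq_pscan]
    simp only [Option.none_or]
    split_ifs
    · rfl
    · exact pscan_congr _ _ (pQ_all vs longs hlongs) 0 row
  rw [hE] at hS ⊢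
  rw [hS]
  rcases scanExactA vs 0 row with _ | i <;> simp

-- B's final assembly step, phrased through the combined option
theorem portB_step_eq (exact sub : PySem.Dict String Int)
    (m : PySem.Dict String Int) (fv : String × List String) :
    (match exact.get? fv.1 with
     | some i => m.insert fv.1 i
     | none => match sub.get? fv.1 with
               | some i => m.insert fv.1 i
               | none => m)
    = match (exact.get? fv.1).or (sub.get? fv.1) with
      | some i => m.insert fv.1 i
      | none => m := by
  rcases exact.get? fv.1 <;> rcases sub.get? fv.1 <;> rfl

theorem ports_agree (row : List String) :
    detect_columns_fmt_a_py row = detect_columns_fmt_a_py_alt row := by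
  unfold detect_columns_fmt_a_py detect_columns_fmt_a_py_alt
  have hnd : (headerMapA.map Prod.fst).Nodup := by decide
  have hfresh : ∀ fv ∈ headerMapA,
      (PySem.Dict.empty : PySem.Dict String Int).contains fv.1 = false :=
    fun fv _ => PySem.Dict.contains_empty _
  have hfield : ∀ fv ∈ headerMapA,
      (((exactPassB PySem.Dict.empty 0 row).get? fv.1).or
        ((subPassB (exactPassB PySem.Dict.empty 0 row) PySem.Dict.empty 0 row).get? fv.1))
      = ((scanExactA fv.2 0 row).or (scanSubA fv.2 0 row)) := by
    intro fv hfv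
    simp only [headerMapA, List.mem_cons, List.not_mem_nil, or_false] at hfv
    rcases hfv with rfl | rfl | rfl | rfl | rfl | rfl
    · exact field_opt row "date" ["value date", "valuedate", "date"]
        ["value date", "valuedate", "date"] []
        [("description", ["description", "narration", "particulars"]),
         ("cheque", ["cheque no", "chequeno", "cheque"]),
         ("debit", ["debit", "withdrawal"]),
         ("credit", ["credit", "deposit"]),
         ("balance", ["balance", "running balance"])]
        (by decide) (by decide) (by decide)
        (pE_of "date" _ (by decide)) (by decide)
    · exact field_opt row "description" ["description", "narration", "particulars"]
        ["description", "narration", "particulars"]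
        [("date", ["value date", "valuedate", "date"])]
        [("cheque", ["cheque no", "chequeno", "cheque"]),
         ("debit", ["debit", "withdrawal"]),
         ("credit", ["credit", "deposit"]),
         ("balance", ["balance", "running balance"])]
        (by decide) (by decide) (by decide)
        (pE_of "description" _ (by decide)) (by decide)
    · exact field_opt row "cheque" ["cheque no", "chequeno", "cheque"]
        ["cheque no", "chequeno", "cheque"]
        [("date", ["value date", "valuedate", "date"]),
         ("description", ["description", "narration", "particulars"])]
        [("debit", ["debit", "withdrawal"]),
         ("credit", ["credit", "deposit"]),
         ("balance", ["balance", "running balance"])]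
        (by decide) (by decide) (by decide)
        (pE_of "cheque" _ (by decide)) (by decide)
    · exact field_opt row "debit" ["dr", "debit", "withdrawal"]
        ["debit", "withdrawal"]
        [("date", ["value date", "valuedate", "date"]),
         ("description", ["description", "narration", "particulars"]),
         ("cheque", ["cheque no", "chequeno", "cheque"])]
        [("credit", ["credit", "deposit"]),
         ("balance", ["balance", "running balance"])]
        (by decide) (by decide) (by decide)
        (pE_of "debit" _ (by decide)) (by decide)
    · exact field_opt row "credit" ["cr", "credit", "deposit"]
        ["credit", "deposit"]
        [("date", ["value date", "valuedate", "date"]),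
         ("description", ["description", "narration", "particulars"]),
         ("cheque", ["cheque no", "chequeno", "cheque"]),
         ("debit", ["debit", "withdrawal"])]
        [("balance", ["balance", "running balance"])]
        (by decide) (by decide) (by decide)
        (pE_of "credit" _ (by decide)) (by decide)
    · exact field_opt row "balance" ["balance", "running balance"]
        ["balance", "running balance"]
        [("date", ["value date", "valuedate", "date"]),
         ("description", ["description", "narration", "particulars"]),
         ("cheque", ["cheque no", "chequeno", "cheque"]),
         ("debit", ["debit", "withdrawal"]),
         ("credit", ["credit", "deposit"])]
        [] (by decide) (by decide) (by decide)
        (pE_of "balance" _ (by decide)) (by decide)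
  have hdicts :
      headerMapA.foldl (fun (m : PySem.Dict String Int) fv =>
        let m1 := match scanExactA fv.2 0 row with
                  | some i => m.insert fv.1 i
                  | none => m
        if (m1.get? fv.1).isSome then m1
        else match scanSubA fv.2 0 row with
             | some i => m1.insert fv.1 i
             | none => m1) PySem.Dict.empty
      = headerMapA.foldl (fun (m : PySem.Dict String Int) fv =>
          match (exactPassB PySem.Dict.empty 0 row).get? fv.1 with
          | some i => m.insert fv.1 i
          | none => match (subPassB (exactPassB PySem.Dict.empty 0 row) PySem.Dict.empty 0 row).get? fv.1 with
                    | some i => m.insert fv.1 i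
                    | none => m) PySem.Dict.empty := by
    have hstep : (fun (m : PySem.Dict String Int) (fv : String × List String) =>
        match (exactPassB PySem.Dict.empty 0 row).get? fv.1 with
        | some i => m.insert fv.1 i
        | none => match (subPassB (exactPassB PySem.Dict.empty 0 row) PySem.Dict.empty 0 row).get? fv.1 with
                  | some i => m.insert fv.1 i
                  | none => m)
      = (fun (m : PySem.Dict String Int) (fv : String × List String) =>
          match ((exactPassB PySem.Dict.empty 0 row).get? fv.1).or
              ((subPassB (exactPassB PySem.Dict.empty 0 row) PySem.Dict.empty 0 row).get? fv.1) with
          | some i => m.insert fv.1 i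
          | none => m) := by
      funext m fv; exact portB_step_eq _ _ m fv
    rw [portA_foldl_eq row headerMapA PySem.Dict.empty hnd hfresh, hstep]
    apply PySem.Dict.ext
    rw [foldl_opt_insert_items _ headerMapA PySem.Dict.empty hnd hfresh,
        foldl_opt_insert_items _ headerMapA PySem.Dict.empty hnd hfresh]
    congr 1
    exact List.filterMap_congr (fun fv hfv => by rw [hfield fv hfv])
  simp only [hdicts]

-- ===== VERDICT (by name: the statement is the Claim_ definition above) =====
theorem detect_columns_fmt_a_py_spec : Claim_equal_detect_columns_fmt_a_py := by
  intro row_clean _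
  unfold Spec_detect_columns_fmt_a_py
  exact ports_agree row_clean
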